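-- pv_equiv track=rewrite | github.com/edrosan/p_1 | fun.py | espacio_memoria
-- ===== SOURCE A (Python) =====
-- def espacio_memoria (memoria, tam):
--     contador = 0
--     posicion = -1
--
--     for pos, proceso in enumerate(memoria):
--         if (proceso == 0):
--             contador += 1
--             if (posicion == -1): posicion = pos
--         elif (proceso != 0):
--             contador = 0;
--             posicion = -1
--         if ( contador == tam ): return posicion
--
--     return -1
-- ===== SOURCE B (Python) =====
-- def espacio_memoria(memoria, tam):
--     # Run-skipping scan: jump to the end of each zero run instead of
--     # stepping element by element with counter state.
--     if tam <= 0: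
--         return -1
--     i, n = 0, len(memoria)
--     while i < n:
--         if memoria[i] == 0:
--             j = i
--             while j < n and memoria[j] == 0:
--                 j += 1
--             if j - i >= tam:
--                 return i
--             i = j
--         else:
--             i += 1
--     return -1
-- ===== Notes on version B (the rewrite author's own statement) =====
-- stated objective: alternative
-- what changed: Replaces A's per-element counter/position state machine with a run-skipping scan: at each zero it measures the whole maximal zero run at once, returns its start if long enough, otherwise jumps past the run; non-positive tam is answered -1 up front instead of via A's counter-never-matches behaviour.
import Mathlib
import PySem

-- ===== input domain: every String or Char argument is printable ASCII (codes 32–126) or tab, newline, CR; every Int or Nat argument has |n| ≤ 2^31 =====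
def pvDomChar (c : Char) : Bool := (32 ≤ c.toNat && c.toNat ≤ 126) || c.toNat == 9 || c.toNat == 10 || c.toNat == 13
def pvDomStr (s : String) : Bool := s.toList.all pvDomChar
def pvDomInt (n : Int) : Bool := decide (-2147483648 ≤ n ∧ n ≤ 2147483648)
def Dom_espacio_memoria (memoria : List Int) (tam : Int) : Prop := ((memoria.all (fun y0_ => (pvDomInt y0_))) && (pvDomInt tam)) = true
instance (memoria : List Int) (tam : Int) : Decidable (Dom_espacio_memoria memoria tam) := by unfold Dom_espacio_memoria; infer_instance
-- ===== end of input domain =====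

-- B replaces A's per-element counter/position state machine with a run-skipping scan
-- (measure each maximal zero run at once); same O(n) cost, alternative algorithm.

-- ===== PORT A =====
-- the for-loop over enumerate(memoria) with state (contador, posicion), early return on contador == tam
def espacioGoA (tam : Int) : List Int → Int → Int → Int → Int
  | [], _, _, _ => -1
  | proceso :: rest, pos, contador, posicion =>
    if proceso = 0 then
      let contador' := contador + 1
      let posicion' := if posicion = -1 then pos else posicion
      if contador' = tam then posicion'
      else espacioGoA tam rest (pos + 1) contador' posicion'
    else
      -- elif proceso != 0: contador = 0; posicion = -1; then the contador == tam check
      if (0 : Int) = tam then (-1 : Int)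
      else espacioGoA tam rest (pos + 1) 0 (-1)

def espacio_memoria (memoria : List Int) (tam : Int) : Int :=
  espacioGoA tam memoria 0 0 (-1)

-- ===== PORT B =====
-- inner while loop: length of the leading zero run (j - i in Source B)
def runLenB : List Int → Nat
  | [] => 0
  | x :: xs => if x = 0 then runLenB xs + 1 else 0

-- outer while loop: i is the current absolute index, the list argument is memoria[i:]
def espacioGoB (tam : Int) : List Int → Int → Int
  | [], _ => -1
  | x :: xs, i =>
    if x = 0 then
      let k := runLenB xs + 1   -- j - i
      if tam ≤ (k : Int) then i
      else espacioGoB tam ((x :: xs).drop k) (i + (k : Int))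
    else espacioGoB tam xs (i + 1)
  termination_by l _ => l.length
  decreasing_by
    all_goals (simp; try omega)

def espacio_memoria_alt (memoria : List Int) (tam : Int) : Int :=
  if tam ≤ 0 then -1 else espacioGoB tam memoria 0

-- ===== PRECONDITION & SPEC =====
def Spec_espacio_memoria (memoria : List Int) (tam : Int) (out : Int) : Prop := out = espacio_memoria_alt memoria tam
instance (memoria : List Int) (tam : Int) (out : Int) : Decidable (Spec_espacio_memoria memoria tam out) := by unfold Spec_espacio_memoria; infer_instance

-- ===== CLAIM (what is proved, stated in full; the proofs are below) =====
def Claim_equal_espacio_memoria : Prop := ∀ (memoria : List Int) (tam : Int), Dom_espacio_memoria memoria tam → Spec_espacio_memoria memoria tam (espacio_memoria memoria tam)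

-- ===== LEMMAS AND PROOFS =====

-- when tam ≤ 0, A's counter (kept ≥ 0) hits tam only at a reset, where posicion = -1
theorem goA_nonpos (tam : Int) (h : tam ≤ 0) :
    ∀ (l : List Int) (pos c q : Int), 0 ≤ c → espacioGoA tam l pos c q = -1 := by
  intro l
  induction l with
  | nil => intro pos c q _; simp [espacioGoA]
  | cons x xs ih =>
    intro pos c q hc
    by_cases hx : x = 0
    · simp only [espacioGoA, if_pos hx]
      have : ¬ (c + 1 = tam) := by omega
      simp only [if_neg this]
      exact ih _ _ _ (by omega)
    · simp only [espacioGoA, if_neg hx]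
      by_cases h0 : (0 : Int) = tam
      · simp [h0]
      · simp only [if_neg h0]
        exact ih _ _ _ le_rfl

-- A inside/entering a zero run: if the remaining run reaches tam, A returns the run's
-- start; otherwise A falls off the run and restarts with fresh state past it.
theorem goA_run (tam : Int) (_ht : 1 ≤ tam) :
    ∀ (l : List Int) (pos c q : Int), 0 ≤ pos → 0 ≤ c → c < tam → (c = 0 → q = -1) → (1 ≤ c → 0 ≤ q) →
      espacioGoA tam l pos c q =
        if tam ≤ c + (runLenB l : Int) then (if c = 0 then pos else q)
        else espacioGoA tam (l.drop (runLenB l)) (pos + (runLenB l : Int)) 0 (-1) := by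
  intro l
  induction l with
  | nil =>
    intro pos c q hpos hc hct _ _
    have hcf : ¬ tam ≤ c := by omega
    simp [runLenB, espacioGoA, hcf]
  | cons x xs ih =>
    intro pos c q hpos hc hct hq0 hq1
    by_cases hx : x = 0
    · have hrun : runLenB (x :: xs) = runLenB xs + 1 := by simp [runLenB, hx]
      simp only [espacioGoA, if_pos hx]
      have hq' : (if q = -1 then pos else q) = (if c = 0 then pos else q) := by
        by_cases hc0 : c = 0
        · simp [hq0 hc0, hc0]
        · have : 0 ≤ q := hq1 (by omega)
          have : ¬ q = -1 := by omega
          simp [this, hc0]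
      by_cases hhit : c + 1 = tam
      · have : tam ≤ c + ((runLenB (x :: xs)) : Int) := by rw [hrun]; push_cast; omega
        simp [hhit, this, hq']
      · have hlt : c + 1 < tam := by omega
        simp only [if_neg hhit]
        rw [ih (pos + 1) (c + 1) (if q = -1 then pos else q) (by omega) (by omega) hlt
            (by omega) (by intro _; rw [hq']; by_cases hc0 : c = 0 <;> simp [hc0] <;> omega)]
        rw [hrun]
        push_cast
        have harith : c + 1 + (runLenB xs : Int) = c + ((runLenB xs : Int) + 1) := by ring
        rw [harith]
        by_cases hcond : tam ≤ c + ((runLenB xs : Int) + 1)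
        · have : ¬ (c + 1 = 0) := by omega
          simp [hcond, this, hq']
        · have hdrop : (x :: xs).drop (runLenB xs + 1) = xs.drop (runLenB xs) := by simp
          simp only [if_neg hcond]
          rw [hdrop]
          ring_nf
    · have hrun : runLenB (x :: xs) = 0 := by simp [runLenB, hx]
      have hcf : ¬ tam ≤ c := by omega
      simp only [hrun, Nat.cast_zero, add_zero, List.drop_zero, if_neg hcf]
      simp [espacioGoA, hx]

-- main correspondence for tam ≥ 1, by strong induction on the list length
theorem goA_eq_goB (tam : Int) (ht : 1 ≤ tam) :
    ∀ (n : Nat) (l : List Int) (pos : Int), l.length ≤ n → 0 ≤ pos →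
      espacioGoA tam l pos 0 (-1) = espacioGoB tam l pos := by
  intro n
  induction n with
  | zero =>
    intro l pos hlen _
    have : l = [] := by cases l <;> simp_all
    simp [this, espacioGoA, espacioGoB]
  | succ m ih =>
    intro l pos hlen hpos
    cases l with
    | nil => simp [espacioGoA, espacioGoB]
    | cons x xs =>
      by_cases hx : x = 0
      · rw [goA_run tam ht (x :: xs) pos 0 (-1) hpos le_rfl (by omega) (fun _ => rfl)
            (by omega)]
        have hrun : runLenB (x :: xs) = runLenB xs + 1 := by simp [runLenB, hx]
        simp only [espacioGoB, if_pos hx]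
        rw [hrun]
        push_cast
        rw [zero_add]
        split_ifs with hcond
        · rfl
        · have hlen' : ((x :: xs).drop (runLenB xs + 1)).length ≤ m := by
            simp only [List.length_drop, List.length_cons] at *
            omega
          have := ih _ (pos + ((runLenB xs : Int) + 1)) hlen' (by positivity)
          simpa using this
      · simp only [espacioGoA, if_neg hx, espacioGoB]
        have h0 : ¬ (0 : Int) = tam := by omega
        simp only [if_neg h0]
        exact ih xs (pos + 1) (by simp at hlen ⊢; omega) (by omega)

-- ===== VERDICT (by name: the statement is the Claim_ definition above) =====
theorem espacio_memoria_spec : Claim_equal_espacio_memoria := by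
  intro memoria tam _
  unfold Spec_espacio_memoria espacio_memoria espacio_memoria_alt
  by_cases ht : tam ≤ 0
  · simp only [if_pos ht]
    exact goA_nonpos tam ht memoria 0 0 (-1) le_rfl
  · simp only [if_neg ht]
    exact goA_eq_goB tam (by omega) memoria.length memoria 0 le_rfl le_rfl
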